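-- pv_equiv track=rewrite | github.com/om-prakash-sde/dsa-in-python | Level-1/Dynamic_Programming/Dynamic_Programming-And-Greedy/Coin_change_Permutations.py | coin_perm
-- ===== SOURCE A (Python) =====
-- def coin_perm(n, arr, amt):
--     dp = [0 for i in range(0, (amt + 1))]
--     # possible case at 0th position is always one
--     dp[0] = 1
--
--     for i in range(1, len(dp)):
--         for j in arr:
--             if j <= i:
--                 # ramt - remaining amount
--                 ramt = i - j
--                 dp[i] += dp[ramt]
--
--     return dp[amt]
-- ===== SOURCE B (Python) =====
-- def coin_perm(n, arr, amt):
--     # Top-down memoized counting of the same recurrence, driven by an explicit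
--     # work stack instead of filling a dp table left to right.
--     memo = {0: 1}
--     stack = [amt]
--     while stack:
--         r = stack[-1]
--         if r in memo:
--             stack.pop()
--             continue
--         pending = [r - j for j in arr if j <= r and (r - j) not in memo]
--         if pending:
--             stack.extend(pending)
--         else:
--             memo[r] = sum(memo[r - j] for j in arr if j <= r)
--             stack.pop()
--     return memo[amt]
-- ===== Notes on version B (the rewrite author's own statement) =====
-- stated objective: alternative
-- what changed: Replaces A's left-to-right dp-table fill (in-place accumulation over a preallocated list) with demand-driven top-down memoization: an explicit work stack resolves only the amounts actually reachable, caching each in a dict.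
-- outside the precondition, e.g. on coin_perm(1, [1, 0], 2): A returns 4, B does not finish within the time limit; on coin_perm(1, [0], 1): A returns 0, B does not finish within the time limit
import Mathlib
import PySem

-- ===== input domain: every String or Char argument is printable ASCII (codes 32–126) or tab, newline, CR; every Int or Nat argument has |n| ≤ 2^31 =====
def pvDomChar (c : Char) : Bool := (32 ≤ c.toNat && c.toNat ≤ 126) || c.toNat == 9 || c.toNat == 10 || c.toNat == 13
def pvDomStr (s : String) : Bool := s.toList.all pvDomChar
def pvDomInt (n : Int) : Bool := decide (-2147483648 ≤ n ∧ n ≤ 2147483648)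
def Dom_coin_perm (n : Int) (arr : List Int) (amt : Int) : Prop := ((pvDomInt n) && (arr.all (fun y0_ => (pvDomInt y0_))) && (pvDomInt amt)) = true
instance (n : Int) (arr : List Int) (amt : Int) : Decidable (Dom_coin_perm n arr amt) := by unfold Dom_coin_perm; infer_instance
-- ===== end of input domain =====

-- B replaces A's left-to-right dp-table fill with demand-driven top-down memoization
-- (an explicit work stack plus a cache dict); an alternative of the same cost.

-- ===== PORT A =====
-- literal transliteration of A: dp table preallocated (an Array, Python's O(1)-indexed
-- list), filled left to right, inner loop mutates dp[i] in place.  All indices are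
-- nonnegative and in range under Pre_, where setIfInBounds/getD are exact.
def coin_perm (n : Int) (arr : List Int) (amt : Int) : Int :=
  let dp0 : Array Int := ((PySem.List.pyRange 0 (amt + 1) 1).map (fun _ => (0 : Int))).toArray
  let dp1 := dp0.setIfInBounds 0 1
  let dp2 := (PySem.List.pyRange 1 (dp1.size : Int) 1).foldl
    (fun dp i => arr.foldl
      (fun dp j =>
        if j ≤ i then
          dp.setIfInBounds i.toNat (dp.getD i.toNat 0 + dp.getD (i - j).toNat 0)
        else dp) dp) dp1
  dp2.getD amt.toNat 0

-- ===== PORT B =====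
-- the memo dict of Source B, keyed by remaining amount: under Pre_ every key lies in
-- 0..amt, so it is held as an Array of amt+1 option slots (O(1) lookup, as Python's dict)
def mget (m : Array (Option Int)) (r : Int) : Option Int :=
  if 0 ≤ r then m.getD r.toNat none else none

def mset (m : Array (Option Int)) (r : Int) (v : Int) : Array (Option Int) :=
  if 0 ≤ r then m.setIfInBounds r.toNat (some v) else m

-- one iteration of Source B's while loop; the stack is kept top-at-head (Python keeps
-- top-at-end: push = extend(pending), hence pending.reverse here — same pop order).
def stepB (arr : List Int) (st : List Int × Array (Option Int)) : List Int × Array (Option Int) :=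
  match st with
  | ([], memo) => ([], memo)
  | (r :: rest, memo) =>
    if (mget memo r).isSome then (rest, memo)
    else
      let pending := (arr.filter (fun j => j ≤ r && !(mget memo (r - j)).isSome)).map (fun j => r - j)
      if pending.isEmpty then
        (rest, mset memo r (arr.foldl (fun acc j => if j ≤ r then acc + (mget memo (r - j)).getD 0 else acc) 0))
      else (pending.reverse ++ r :: rest, memo)

-- Source B's while loop run with a fuel bound that makes it total (proved sufficient under
-- Pre_; one extra step on an empty stack is the identity).
def coin_perm_alt (n : Int) (arr : List Int) (amt : Int) : Int :=
  let memo0 := mset (Array.replicate (amt.toNat + 1) none) 0 1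
  let fuel := (amt.toNat + 2) * (2 * arr.length + 4)
  let st := (stepB arr)^[fuel] ([amt], memo0)
  (mget st.2 amt).getD 0

-- ===== PRECONDITION & SPEC =====
-- Pre_ excludes negative amounts (A raises IndexError: dp is empty when dp[0]=1 runs)
-- and, for amt ≥ 1, coin lists with a nonpositive coin: a negative coin makes A raise
-- IndexError (dp[i-j] past the end), and on a zero coin — an ill-posed query with
-- infinitely many permutations — A returns an accidental order-dependent value of its
-- in-place accumulation while B's demand-driven resolution diverges.
def Pre_coin_perm (n : Int) (arr : List Int) (amt : Int) : Prop :=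
  0 ≤ amt ∧ (amt = 0 ∨ ∀ j ∈ arr, 0 < j)
instance (n : Int) (arr : List Int) (amt : Int) : Decidable (Pre_coin_perm n arr amt) := by
  unfold Pre_coin_perm; infer_instance

def pvWitness_coin_perm : Int × List Int × Int := (0, [1, 2], 3)

def Spec_coin_perm (n : Int) (arr : List Int) (amt : Int) (out : Int) : Prop := out = coin_perm_alt n arr amt
instance (n : Int) (arr : List Int) (amt : Int) (out : Int) : Decidable (Spec_coin_perm n arr amt out) := by unfold Spec_coin_perm; infer_instance

-- ===== CLAIM (what is proved, stated in full; the proofs are below) =====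
def Claim_equal_coin_perm : Prop := ∀ (n : Int) (arr : List Int) (amt : Int), Dom_coin_perm n arr amt → Pre_coin_perm n arr amt → Spec_coin_perm n arr amt (coin_perm n arr amt)


-- ===== LEMMAS AND PROOFS =====

-- the common recurrence: W r = number of coin permutations summing to r (positive coins)
def W (arr : List Int) : Nat → Int
  | 0 => 1
  | r + 1 =>
    (arr.attach.map (fun j =>
      if h : 0 < j.1 ∧ j.1 ≤ ((r : Int) + 1) then W arr ((r + 1) - j.1.toNat) else 0)).sum
decreasing_by
  have h1 : 0 < j.1.toNat := by omega
  omega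


-- W's equation with the attach/dite scaffolding removed
theorem W_succ (arr : List Int) (r : Nat) :
    W arr (r + 1) =
      (arr.map (fun j => if 0 < j ∧ j ≤ ((r : Int) + 1) then W arr ((r + 1) - j.toNat) else 0)).sum := by
  rw [W]
  simp only [dite_eq_ite]
  exact congrArg List.sum (List.attach_map_val (l := arr)
    (f := fun x => if 0 < x ∧ x ≤ (r : Int) + 1 then W arr ((r + 1) - x.toNat) else 0))

-- ---- A-side ----

-- table invariant: dp holds W below m, zeros above
def TabInv (arr : List Int) (a : Nat) (m : Nat) (dp : List Int) : Prop :=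
  dp.length = a + 1 ∧ ∀ k, k ≤ a → dp.getD k 0 = if k ≤ m then W arr k else 0

-- 'init += v' fold as a sum
theorem foldl_if_add (P : Int → Prop) [DecidablePred P] (f : Int → Int) :
    ∀ (l : List Int) (init : Int),
      l.foldl (fun acc j => if P j then acc + f j else acc) init
        = init + (l.map (fun j => if P j then f j else 0)).sum := by
  intro l
  induction l with
  | nil => intro init; simp
  | cons j t ih =>
    intro init
    simp only [List.foldl_cons, List.map_cons, List.sum_cons]
    by_cases h : P j
    · rw [if_pos h, if_pos h, ih]; ring
    · rw [if_neg h, if_neg h, ih]; ring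

theorem pySetD_toNat (dp : List Int) (i : Int) (h : 0 ≤ i) (v : Int) :
    PySem.List.pySetD dp i v = dp.set i.toNat v := by
  have e := PySem.List.pySetD_natCast (xs := dp) (n := i.toNat) (v := v)
  rwa [Int.toNat_of_nonneg h] at e

theorem pyGetD_toNat (dp : List Int) (i : Int) (h : 0 ≤ i) :
    PySem.List.pyGetD dp i 0 = dp.getD i.toNat 0 := by
  have e := PySem.List.pyGetD_natCast (xs := dp) (n := i.toNat) (d := (0 : Int))
  rwa [Int.toNat_of_nonneg h] at e

theorem getD_set_ne (dp : List Int) (k k' : Nat) (h : k' ≠ k) (v : Int) :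
    (dp.set k v).getD k' 0 = dp.getD k' 0 := by
  rw [List.getD_eq_getElem?_getD, List.getD_eq_getElem?_getD, List.getElem?_set_ne (by omega)]

theorem getD_set_self (dp : List Int) (k : Nat) (h : k < dp.length) (v : Int) :
    (dp.set k v).getD k 0 = v := by
  simp [List.getD_eq_getElem?_getD, h]

theorem set_getD_self (dp : List Int) (k : Nat) (h : k < dp.length) :
    dp.set k (dp.getD k 0) = dp := by
  rw [List.getD_eq_getElem dp 0 h]; exact List.set_getElem_self h

-- A's computation re-stated over a plain List (the Array port is bridged to it below)
def coinA (arr : List Int) (amt : Int) : Int :=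
  let dp0 := (PySem.List.pyRange 0 (amt + 1) 1).map (fun _ => (0 : Int))
  let dp1 := PySem.List.pySetD dp0 0 1
  let dp2 := (PySem.List.pyRange 1 (dp1.length : Int) 1).foldl
    (fun dp i => arr.foldl
      (fun dp j =>
        if j ≤ i then
          PySem.List.pySetD dp i (PySem.List.pyGetD dp i 0 + PySem.List.pyGetD dp (i - j) 0)
        else dp) dp) dp1
  PySem.List.pyGetD dp2 amt 0

theorem agetD (dp : Array Int) (k : Nat) : dp.getD k 0 = dp.toList.getD k 0 := by
  rw [Array.getD_eq_getD_getElem?, List.getD_eq_getElem?_getD, ← Array.getElem?_toList]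

theorem inner_sim (i : Int) (hi : 1 ≤ i) :
    ∀ (l : List Int) (dp : Array Int),
      (l.foldl (fun dp j =>
          if j ≤ i then
            dp.setIfInBounds i.toNat (dp.getD i.toNat 0 + dp.getD (i - j).toNat 0)
          else dp) dp).toList
        = l.foldl (fun dp j =>
            if j ≤ i then
              PySem.List.pySetD dp i (PySem.List.pyGetD dp i 0 + PySem.List.pyGetD dp (i - j) 0)
            else dp) dp.toList := by
  intro l
  induction l with
  | nil => intro dp; simp
  | cons j t ih =>
    intro dp
    simp only [List.foldl_cons]
    by_cases hj : j ≤ i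
    · rw [if_pos hj, if_pos hj, ih]
      congr 1
      rw [Array.toList_setIfInBounds, pySetD_toNat _ i (by omega),
        pyGetD_toNat _ i (by omega), pyGetD_toNat _ (i - j) (by omega),
        agetD, agetD]
    · rw [if_neg hj, if_neg hj, ih]

-- the Array port of A computes exactly the List computation coinA
theorem A_bridge (n : Int) (arr : List Int) (amt : Int) (hamt : 0 ≤ amt) :
    coin_perm n arr amt = coinA arr amt := by
  unfold coin_perm coinA
  dsimp only
  have h0 : (((PySem.List.pyRange 0 (amt + 1) 1).map (fun _ => (0 : Int))).toArray.setIfInBounds 0 1).toList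
      = PySem.List.pySetD ((PySem.List.pyRange 0 (amt + 1) 1).map (fun _ => (0 : Int))) 0 1 := by
    rw [Array.toList_setIfInBounds, List.toList_toArray, pySetD_toNat _ 0 le_rfl]
    norm_num
  have hsz : ((((PySem.List.pyRange 0 (amt + 1) 1).map (fun _ => (0 : Int))).toArray.setIfInBounds 0 1).size : Int)
      = ((PySem.List.pySetD ((PySem.List.pyRange 0 (amt + 1) 1).map (fun _ => (0 : Int))) 0 1).length : Int) := by
    rw [← Array.length_toList, h0]
  rw [hsz]
  have houter : ∀ (idx : List Int), (∀ i ∈ idx, 1 ≤ i) → ∀ (dpA : Array Int),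
      (idx.foldl (fun dp i => arr.foldl (fun dp j =>
          if j ≤ i then
            dp.setIfInBounds i.toNat (dp.getD i.toNat 0 + dp.getD (i - j).toNat 0)
          else dp) dp) dpA).toList
        = idx.foldl (fun dp i => arr.foldl (fun dp j =>
            if j ≤ i then
              PySem.List.pySetD dp i (PySem.List.pyGetD dp i 0 + PySem.List.pyGetD dp (i - j) 0)
            else dp) dp) dpA.toList := by
    intro idx
    induction idx with
    | nil => intro _ dpA; simp
    | cons i t ih =>
      intro hmem dpA
      simp only [List.foldl_cons]
      rw [ih (fun x hx => hmem x (List.mem_cons_of_mem _ hx))]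
      rw [inner_sim i (hmem i List.mem_cons_self) arr dpA]
  have hmem : ∀ i ∈ PySem.List.pyRange 1 ((PySem.List.pySetD ((PySem.List.pyRange 0 (amt + 1) 1).map (fun _ => (0 : Int))) 0 1).length : Int) 1, 1 ≤ i := by
    intro i hi
    exact (PySem.List.mem_pyRange_one.mp hi).1
  rw [pyGetD_toNat _ amt hamt, ← houter _ hmem, ← h0]
  rw [agetD]

-- the inner 'for j in arr' loop of A writes only index i, reading strictly below it
theorem innerA (i : Int) (hi : 1 ≤ i) :
    ∀ (arr : List Int), (∀ j ∈ arr, 0 < j) → ∀ (dp : List Int), i < (dp.length : Int) →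
      arr.foldl (fun dp j =>
          if j ≤ i then
            PySem.List.pySetD dp i (PySem.List.pyGetD dp i 0 + PySem.List.pyGetD dp (i - j) 0)
          else dp) dp
        = dp.set i.toNat (dp.getD i.toNat 0
            + (arr.map (fun j => if j ≤ i then dp.getD (i - j).toNat 0 else 0)).sum) := by
  intro arr
  induction arr with
  | nil =>
    intro _ dp hlen
    simp only [List.foldl_nil, List.map_nil, List.sum_nil, add_zero]
    exact (set_getD_self dp i.toNat (by omega)).symm
  | cons j t ih =>
    intro hpos dp hlen
    have h0j : 0 < j := hpos j List.mem_cons_self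
    have hpost : ∀ x ∈ t, 0 < x := fun x hx => hpos x (List.mem_cons_of_mem _ hx)
    simp only [List.foldl_cons, List.map_cons, List.sum_cons]
    by_cases hj : j ≤ i
    · rw [if_pos hj, if_pos hj]
      rw [pySetD_toNat dp i (by omega), pyGetD_toNat dp i (by omega),
        pyGetD_toNat dp (i - j) (by omega)]
      rw [ih hpost _ (by simpa using hlen)]
      rw [getD_set_self dp i.toNat (by omega)]
      have hsum : (t.map (fun j' => if j' ≤ i then
            (dp.set i.toNat (dp.getD i.toNat 0 + dp.getD (i - j).toNat 0)).getD (i - j').toNat 0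
          else 0))
          = t.map (fun j' => if j' ≤ i then dp.getD (i - j').toNat 0 else 0) := by
        apply List.map_congr_left
        intro x hx
        have h0x : 0 < x := hpost x hx
        by_cases hx2 : x ≤ i
        · rw [if_pos hx2, if_pos hx2, getD_set_ne dp i.toNat (i - x).toNat (by omega) _]
        · rw [if_neg hx2, if_neg hx2]
      rw [hsum, List.set_set, add_assoc]
    · rw [if_neg hj, if_neg hj, ih hpost dp hlen, zero_add]

-- the whole dp loop of A establishes the table invariant
theorem outerA (arr : List Int) (hpos : ∀ j ∈ arr, 0 < j) (a : Nat) :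
    ∀ (t : Nat), t ≤ a →
      TabInv arr a t ((PySem.List.pyRange 1 ((t : Int) + 1) 1).foldl
        (fun dp i => arr.foldl (fun dp j =>
            if j ≤ i then
              PySem.List.pySetD dp i (PySem.List.pyGetD dp i 0 + PySem.List.pyGetD dp (i - j) 0)
            else dp) dp)
        (PySem.List.pySetD ((PySem.List.pyRange 0 ((a : Int) + 1) 1).map (fun _ => (0 : Int))) 0 1)) := by
  have hrepl : (PySem.List.pyRange 0 ((a : Int) + 1) 1).map (fun _ => (0 : Int))
      = List.replicate (a + 1) (0 : Int) := by
    rw [List.eq_replicate_iff]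
    constructor
    · rw [List.length_map, PySem.List.length_pyRange_one]; omega
    · intro b hb
      rcases List.mem_map.mp hb with ⟨_, _, h⟩
      exact h.symm
  have hinit : PySem.List.pySetD ((PySem.List.pyRange 0 ((a : Int) + 1) 1).map (fun _ => (0 : Int))) 0 1
      = (List.replicate (a + 1) (0 : Int)).set 0 1 := by
    rw [hrepl, pySetD_toNat _ 0 le_rfl 1]
    norm_num
  have hinitInv : TabInv arr a 0 ((List.replicate (a + 1) (0 : Int)).set 0 1) := by
    constructor
    · simp
    · intro k hk
      by_cases hk0 : k = 0
      · subst hk0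
        rw [getD_set_self _ 0 (by simp)]
        simp [W]
      · rw [getD_set_ne _ 0 k hk0 1, List.getD_replicate]
        · rw [if_neg (by omega)]
        · omega
  intro t
  induction t with
  | zero =>
    intro _
    have : PySem.List.pyRange 1 ((0 : Nat) + 1 : Int) 1 = [] := by
      apply PySem.List.pyRange_one_eq_nil; norm_num
    rw [show ((0 : Nat) : Int) + 1 = ((1 : Int)) by norm_num] at *
    rw [PySem.List.pyRange_one_eq_nil le_rfl, List.foldl_nil, hinit]
    exact hinitInv
  | succ t iht =>
    intro ht
    have iht' := iht (by omega)
    have hsplit : PySem.List.pyRange 1 (((t + 1 : Nat) : Int) + 1) 1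
        = PySem.List.pyRange 1 ((t : Int) + 1) 1 ++ [(t : Int) + 1] := by
      have := PySem.List.pyRange_one_succ_right (a := 1) (b := (t : Int) + 1) (by omega)
      rw [show (((t + 1 : Nat) : Int) + 1) = ((t : Int) + 1) + 1 by push_cast; ring]
      exact this
    rw [hsplit, List.foldl_append, List.foldl_cons, List.foldl_nil]
    set dpt := (PySem.List.pyRange 1 ((t : Int) + 1) 1).foldl
        (fun dp i => arr.foldl (fun dp j =>
            if j ≤ i then
              PySem.List.pySetD dp i (PySem.List.pyGetD dp i 0 + PySem.List.pyGetD dp (i - j) 0)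
            else dp) dp)
        (PySem.List.pySetD ((PySem.List.pyRange 0 ((a : Int) + 1) 1).map (fun _ => (0 : Int))) 0 1) with hdpt
    obtain ⟨hlen, hval⟩ := iht'
    have hlen' : ((t : Int) + 1) < (dpt.length : Int) := by rw [hlen]; push_cast; omega
    rw [innerA ((t : Int) + 1) (by omega) arr hpos dpt hlen']
    have hidx : ((t : Int) + 1).toNat = t + 1 := by omega
    have htop : dpt.getD (t + 1) 0 = 0 := by
      rw [hval (t + 1) (by omega)]
      rw [if_neg (by omega)]
    have hsum : (arr.map (fun j => if j ≤ (t : Int) + 1 then dpt.getD (((t : Int) + 1) - j).toNat 0 else 0)).sum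
        = W arr (t + 1) := by
      rw [W_succ]
      congr 1
      apply List.map_congr_left
      intro j hj
      have h0j : 0 < j := hpos j hj
      by_cases hle : j ≤ (t : Int) + 1
      · rw [if_pos hle, if_pos ⟨h0j, hle⟩]
        have hk : (((t : Int) + 1) - j).toNat = (t + 1) - j.toNat := by omega
        rw [hk, hval ((t + 1) - j.toNat) (by omega)]
        rw [if_pos (by omega)]
      · rw [if_neg hle, if_neg (by exact fun h => hle h.2)]
    constructor
    · rw [List.length_set, hlen]
    · intro k hk
      by_cases hk1 : k = t + 1
      · subst hk1
        rw [hidx, getD_set_self dpt (t + 1) (by omega), htop, hsum, zero_add, if_pos le_rfl]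
      · rw [hidx, getD_set_ne dpt (t + 1) k hk1 _, hval k hk]
        by_cases hk2 : k ≤ t
        · rw [if_pos hk2, if_pos (by omega)]
        · rw [if_neg hk2, if_neg (by omega)]

theorem A_eq_W (arr : List Int) (hpos : ∀ j ∈ arr, 0 < j) (amt : Int) (hamt : 0 ≤ amt) :
    coinA arr amt = W arr amt.toNat := by
  have hcast : amt = ((amt.toNat : Nat) : Int) := (Int.toNat_of_nonneg hamt).symm
  unfold coinA
  dsimp only
  rw [hcast]
  set a := amt.toNat with ha
  have h1 : PySem.List.pySetD ((PySem.List.pyRange 0 ((a : Int) + 1) 1).map (fun _ => (0 : Int))) 0 1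
      = (List.replicate (a + 1) (0 : Int)).set 0 1 := by
    have hrepl : (PySem.List.pyRange 0 ((a : Int) + 1) 1).map (fun _ => (0 : Int))
        = List.replicate (a + 1) (0 : Int) := by
      rw [List.eq_replicate_iff]
      constructor
      · rw [List.length_map, PySem.List.length_pyRange_one]; omega
      · intro b hb
        rcases List.mem_map.mp hb with ⟨_, _, h⟩
        exact h.symm
    rw [hrepl, pySetD_toNat _ 0 le_rfl 1]
    norm_num
  have hlen1 : ((PySem.List.pySetD ((PySem.List.pyRange 0 ((a : Int) + 1) 1).map (fun _ => (0 : Int))) 0 1).length : Int)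
      = (a : Int) + 1 := by
    rw [h1]
    simp
  rw [hlen1]
  have := outerA arr hpos a a le_rfl
  obtain ⟨hlen, hval⟩ := this
  rw [pyGetD_toNat _ ((a : Nat) : Int) (by omega)]
  rw [Int.toNat_natCast]
  rw [hval a le_rfl, if_pos le_rfl]

-- ---- B-side ----

def InvM (arr : List Int) (m : Array (Option Int)) : Prop :=
  mget m 0 = some 1 ∧ ∀ q v, mget m q = some v → 0 ≤ q ∧ v = W arr q.toNat

-- number of cached amounts (the potential that bounds the loop's fuel)
def msome (m : Array (Option Int)) : Nat := m.toList.countP (fun o => o.isSome)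

theorem step_nil (arr : List Int) (m : Array (Option Int)) :
    ∀ k, (stepB arr)^[k] ([], m) = ([], m) := by
  intro k
  induction k with
  | zero => rfl
  | succ k ih => rw [Function.iterate_succ_apply]; exact ih

theorem getD_set_neO (l : List (Option Int)) (k k' : Nat) (h : k' ≠ k) (v : Option Int) :
    (l.set k v).getD k' none = l.getD k' none := by
  rw [List.getD_eq_getElem?_getD, List.getD_eq_getElem?_getD, List.getElem?_set_ne (by omega)]

theorem getD_set_selfO (l : List (Option Int)) (k : Nat) (h : k < l.length) (v : Option Int) :
    (l.set k v).getD k none = v := by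
  simp [List.getD_eq_getElem?_getD, h]

theorem mget_eq (m : Array (Option Int)) (r : Int) :
    mget m r = if 0 ≤ r then m.toList.getD r.toNat none else none := by
  unfold mget
  by_cases h : 0 ≤ r
  · rw [if_pos h, if_pos h, Array.getD_eq_getD_getElem?, List.getD_eq_getElem?_getD,
      ← Array.getElem?_toList]
  · rw [if_neg h, if_neg h]

theorem mset_toList (m : Array (Option Int)) (r : Int) (v : Int) (hr : 0 ≤ r) :
    (mset m r v).toList = m.toList.set r.toNat (some v) := by
  unfold mset
  rw [if_pos hr, Array.toList_setIfInBounds]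

theorem size_mset (m : Array (Option Int)) (r : Int) (v : Int) : (mset m r v).size = m.size := by
  unfold mset
  by_cases h : 0 ≤ r
  · rw [if_pos h, Array.size_setIfInBounds]
  · rw [if_neg h]

theorem mget_mset_self (m : Array (Option Int)) (r : Int) (v : Int) (hr : 0 ≤ r)
    (hsz : r.toNat < m.size) : mget (mset m r v) r = some v := by
  rw [mget_eq, if_pos hr, mset_toList m r v hr, getD_set_selfO _ _ (by rw [Array.length_toList]; omega)]

theorem mget_mset_ne (m : Array (Option Int)) (w q : Int) (v : Int) (hq : q ≠ w) :
    mget (mset m w v) q = mget m q := by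
  by_cases hw0 : 0 ≤ w
  · rw [mget_eq, mget_eq, mset_toList m w v hw0]
    by_cases hq0 : 0 ≤ q
    · rw [if_pos hq0, if_pos hq0, getD_set_neO _ _ _ (by omega)]
    · rw [if_neg hq0, if_neg hq0]
  · unfold mset
    rw [if_neg hw0]

theorem msome_le (m : Array (Option Int)) : msome m ≤ m.size := by
  unfold msome
  rw [← Array.length_toList]
  exact List.countP_le_length

theorem msome_set_fresh (m : Array (Option Int)) (r : Int) (v : Int) (hr : 0 ≤ r)
    (hsz : r.toNat < m.size) (hnone : mget m r = none) :
    msome (mset m r v) = msome m + 1 := by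
  unfold msome
  rw [mset_toList m r v hr]
  rw [mget_eq, if_pos hr] at hnone
  have hlen : r.toNat < m.toList.length := by rw [Array.length_toList]; omega
  have key : ∀ (l : List (Option Int)) (k : Nat), k < l.length → l.getD k none = none →
      (l.set k (some v)).countP (fun o => o.isSome) = l.countP (fun o => o.isSome) + 1 := by
    intro l
    induction l with
    | nil => intro k hk _; simp at hk
    | cons x t ih =>
      intro k hk hget
      cases k with
      | zero =>
        have hx : x = none := by simpa using hget
        subst hx
        simp
      | succ k =>
        have := ih k (by simpa using hk) (by simpa using hget)
        simp only [List.set_cons_succ, List.countP_cons, this]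
        omega
  exact key m.toList r.toNat hlen hnone

theorem InvM_val (arr : List Int) (memo : Array (Option Int)) (hInv : InvM arr memo)
    (q v : Int) (h : mget memo q = some v) : 0 ≤ q ∧ v = W arr q.toNat :=
  hInv.2 _ _ h

theorem InvM_mset (arr : List Int) (memo : Array (Option Int)) (hInv : InvM arr memo)
    (r : Int) (hr : 0 ≤ r) (hsz : r.toNat < memo.size) :
    InvM arr (mset memo r (W arr r.toNat)) := by
  obtain ⟨h0, hval⟩ := hInv
  constructor
  · by_cases h0r : (0 : Int) = r
    · rw [← h0r] at hsz ⊢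
      rw [mget_mset_self _ _ _ le_rfl hsz]
      simp [W]
    · rw [mget_mset_ne memo r 0 _ h0r]
      exact h0
  · intro q v h
    by_cases hq : q = r
    · subst hq
      rw [mget_mset_self _ _ _ hr hsz] at h
      exact ⟨hr, (Option.some_inj.mp h).symm⟩
    · rw [mget_mset_ne memo r q _ hq] at h
      exact hval _ _ h

theorem pend_empty_iff (arr : List Int) (r : Int) (memo : Array (Option Int)) :
    ((arr.filter (fun j => j ≤ r && !(mget memo (r - j)).isSome)).map (fun j => r - j)).isEmpty = true
      ↔ ∀ j ∈ arr, j ≤ r → (mget memo (r - j)).isSome = true := by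
  rw [List.isEmpty_iff, List.map_eq_nil_iff, List.filter_eq_nil_iff]
  constructor
  · intro h j hj hle
    have h2 := h j hj
    by_cases hs : (mget memo (r - j)).isSome = true
    · exact hs
    · exfalso
      apply h2
      have hs' : (mget memo (r - j)).isSome = false := by
        revert hs; cases (mget memo (r - j)).isSome <;> simp
      rw [Bool.and_eq_true]
      exact ⟨decide_eq_true hle, by rw [hs']; rfl⟩
  · intro h j hj hb
    rw [Bool.and_eq_true] at hb
    have hle : j ≤ r := of_decide_eq_true hb.1
    have hT := h j hj hle
    rw [hT] at hb
    simp at hb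

-- the value cached for r is W r when every needed sub-amount is already cached
theorem total_eq (arr : List Int) (hpos : ∀ j ∈ arr, 0 < j) (r : Int)
    (memo : Array (Option Int)) (hInv : InvM arr memo) (hr1 : 1 ≤ r)
    (hall : ∀ j ∈ arr, j ≤ r → (mget memo (r - j)).isSome = true) :
    arr.foldl (fun acc j => if j ≤ r then acc + (mget memo (r - j)).getD 0 else acc) 0 = W arr r.toNat := by
  rw [foldl_if_add (fun j => j ≤ r) (fun j => (mget memo (r - j)).getD 0) arr 0, zero_add]
  have hm : r.toNat = (r.toNat - 1) + 1 := by omega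
  rw [hm, W_succ]
  congr 1
  apply List.map_congr_left
  intro j hj
  have h0j : 0 < j := hpos j hj
  have hcast : ((r.toNat - 1 : Nat) : Int) + 1 = r := by omega
  by_cases hle : j ≤ r
  · rw [if_pos hle, if_pos (by rw [hcast]; exact ⟨h0j, hle⟩)]
    obtain ⟨v, hv⟩ := Option.isSome_iff_exists.mp (hall j hj hle)
    rw [hv]
    rcases InvM_val arr memo hInv _ _ hv with ⟨_, hval⟩
    simp only [Option.getD_some]
    rw [hval]
    congr 1
    omega
  · rw [if_neg hle, if_neg (by rw [hcast]; exact fun h => hle h.2)]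

-- one stack entry is fully resolved: the loop pops it after caching its W-value,
-- in a number of steps bounded via the cache's growth
theorem resolve (arr : List Int) (hpos : ∀ j ∈ arr, 0 < j) :
    ∀ (N : Nat) (r : Int) (memo : Array (Option Int)) (rest : List Int),
      0 ≤ r → r < (N : Int) → r.toNat < memo.size → InvM arr memo →
      ∃ (k : Nat) (memo' : Array (Option Int)),
        (stepB arr)^[k] (r :: rest, memo) = (rest, memo') ∧
        InvM arr memo' ∧
        memo'.size = memo.size ∧
        (∀ q v, mget memo q = some v → mget memo' q = some v) ∧
        (∀ q v, mget memo' q = some v → mget memo q = some v ∨ q ≤ r) ∧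
        mget memo' r = some (W arr r.toNat) ∧
        k + (2 * arr.length + 2) * msome memo ≤ 2 + (2 * arr.length + 2) * msome memo' := by
  intro N
  induction N with
  | zero => intro r memo rest hr hrN _ _; exact absurd hrN (by omega)
  | succ N ihN =>
    intro r memo rest hr hrN hrsz hInv
    by_cases hmem : (mget memo r).isSome = true
    · obtain ⟨v, hv⟩ := Option.isSome_iff_exists.mp hmem
      rcases InvM_val arr memo hInv _ _ hv with ⟨_, hval⟩
      refine ⟨1, memo, ?_, hInv, rfl, fun q v h => h, fun q v h => Or.inl h, ?_, by omega⟩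
      · rw [Function.iterate_one]
        simp [stepB, hv]
      · rw [hv, hval]
    · have hnone : mget memo r = none := Option.not_isSome_iff_eq_none.mp (by simpa using hmem)
      have hr1 : 1 ≤ r := by
        rcases Int.lt_or_le 0 r with h | h
        · omega
        · exfalso
          have : r = 0 := by omega
          subst this
          rw [hInv.1] at hnone
          exact absurd hnone (by simp)
      by_cases hpend : ((arr.filter (fun j => j ≤ r && !(mget memo (r - j)).isSome)).map (fun j => r - j)).isEmpty = true
      · -- all sub-amounts cached: one step computes and pops r
        have hall := (pend_empty_iff arr r memo).mp hpend
        have htot := total_eq arr hpos r memo hInv hr1 hall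
        refine ⟨1, mset memo r (W arr r.toNat), ?_, InvM_mset arr memo hInv r (by omega) hrsz,
          size_mset _ _ _, ?_, ?_, mget_mset_self _ _ _ (by omega) hrsz, ?_⟩
        · rw [Function.iterate_one]
          simp only [stepB, hnone, Option.isSome_none, Bool.false_eq_true, if_false, hpend, if_true, htot]
        · intro q v h
          rw [mget_mset_ne memo r q _ (fun hq => by rw [hq, hnone] at h; exact absurd h (by simp))]
          exact h
        · intro q v h
          by_cases hq : q = r
          · exact Or.inr (le_of_eq hq)
          · rw [mget_mset_ne memo r q _ hq] at h
            exact Or.inl h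
        · rw [msome_set_fresh memo r _ (by omega) hrsz hnone]
          have : (2 * arr.length + 2) * (msome memo + 1) = (2 * arr.length + 2) * msome memo + (2 * arr.length + 2) := by ring
          omega
      · -- push branch
        set pending := (arr.filter (fun j => j ≤ r && !(mget memo (r - j)).isSome)).map (fun j => r - j) with hpdef
        have hpelem : ∀ d ∈ pending, 0 ≤ d ∧ d < r ∧ mget memo d = none := by
          intro d hd
          rcases List.mem_map.mp hd with ⟨j, hjf, hdj⟩
          rcases List.mem_filter.mp hjf with ⟨hjarr, hjp⟩
          simp only [Bool.and_eq_true, decide_eq_true_eq, Bool.not_eq_true'] at hjp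
          have h0j : 0 < j := hpos j hjarr
          refine ⟨by omega, by omega, ?_⟩
          rw [← hdj]
          simpa using hjp.2
        -- resolving a whole list of smaller amounts
        have listres : ∀ (vals : List Int), (∀ v ∈ vals, 0 ≤ v ∧ v < r) →
            ∀ (memo1 : Array (Option Int)) (rest1 : List Int), memo1.size = memo.size → InvM arr memo1 →
            ∃ (k : Nat) (m' : Array (Option Int)),
              (stepB arr)^[k] (vals ++ rest1, memo1) = (rest1, m') ∧
              InvM arr m' ∧
              m'.size = memo1.size ∧
              (∀ q v, mget memo1 q = some v → mget m' q = some v) ∧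
              (∀ q v, mget m' q = some v → mget memo1 q = some v ∨ q < r) ∧
              (∀ v ∈ vals, (mget m' v).isSome = true) ∧
              k + (2 * arr.length + 2) * msome memo1 ≤ 2 * vals.length + (2 * arr.length + 2) * msome m' := by
          intro vals
          induction vals with
          | nil =>
            intro _ memo1 rest1 _ hInv1
            exact ⟨0, memo1, rfl, hInv1, rfl, fun q v h => h, fun q v h => Or.inl h, by simp, by omega⟩
          | cons v vs ihv =>
            intro hvals memo1 rest1 hsz1 hInv1
            rcases hvals v List.mem_cons_self with ⟨hv0, hvr⟩
            obtain ⟨k1, m1, he1, hI1, hs1, hmono1, hnew1, hgot1, hb1⟩ :=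
              ihN v memo1 (vs ++ rest1) hv0 (by omega) (by omega) hInv1
            obtain ⟨k2, m2, he2, hI2, hs2, hmono2, hnew2, hgot2, hb2⟩ :=
              ihv (fun x hx => hvals x (List.mem_cons_of_mem _ hx)) m1 rest1 (by omega) hI1
            refine ⟨k2 + k1, m2, ?_, hI2, by omega, ?_, ?_, ?_, ?_⟩
            · rw [Function.iterate_add_apply, List.cons_append, he1, he2]
            · exact fun q w h => hmono2 _ _ (hmono1 _ _ h)
            · intro q w h
              rcases hnew2 _ _ h with h' | h'
              · rcases hnew1 _ _ h' with h'' | h''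
                · exact Or.inl h''
                · exact Or.inr (by omega)
              · exact Or.inr h'
            · intro x hx
              rcases List.mem_cons.mp hx with h | h
              · subst h
                rw [hmono2 _ _ hgot1]; rfl
              · exact hgot2 x h
            · have hlc : (v :: vs).length = vs.length + 1 := rfl
              rw [hlc]
              have h3 : (k2 + k1) + (2 * arr.length + 2) * msome memo1
                  ≤ k2 + 2 + (2 * arr.length + 2) * msome m1 := by omega
              have h4 : k2 + (2 * arr.length + 2) * msome m1 ≤ 2 * vs.length + (2 * arr.length + 2) * msome m2 := hb2
              omega
        have hpb : ∀ d ∈ pending.reverse, 0 ≤ d ∧ d < r := by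
          intro d hd
          rcases hpelem d (List.mem_reverse.mp hd) with ⟨h1, h2, _⟩
          exact ⟨h1, h2⟩
        obtain ⟨k', m', he', hI', hs', hmono', hnew', hgot', hb'⟩ :=
          listres pending.reverse hpb memo (r :: rest) rfl hInv
        -- after the pushed work is done, r itself is computed in one more step
        have hm'r : mget m' r = none := by
          cases h : mget m' r with
          | none => rfl
          | some w =>
            rcases hnew' _ _ h with h' | h'
            · rw [hnone] at h'; exact absurd h' (by simp)
            · omega
        have hall' : ∀ j ∈ arr, j ≤ r → (mget m' (r - j)).isSome = true := by
          intro j hj hle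
          by_cases hs : (mget memo (r - j)).isSome = true
          · obtain ⟨w, hw⟩ := Option.isSome_iff_exists.mp hs
            rw [hmono' _ _ hw]; rfl
          · refine hgot' (r - j) (List.mem_reverse.mpr ?_)
            rw [hpdef]
            exact List.mem_map.mpr ⟨j, List.mem_filter.mpr ⟨hj, by
              simp only [Bool.and_eq_true, decide_eq_true_eq, Bool.not_eq_true']
              exact ⟨hle, by simpa using hs⟩⟩, rfl⟩
        have hpend' : ((arr.filter (fun j => j ≤ r && !(mget m' (r - j)).isSome)).map (fun j => r - j)).isEmpty = true :=
          (pend_empty_iff arr r m').mpr hall'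
        have htot' := total_eq arr hpos r m' hI' hr1 hall'
        have hrsz' : r.toNat < m'.size := by omega
        refine ⟨k' + 2, mset m' r (W arr r.toNat), ?_, InvM_mset arr m' hI' r (by omega) hrsz',
          by rw [size_mset]; omega, ?_, ?_, mget_mset_self _ _ _ (by omega) hrsz', ?_⟩
        · have e1 : stepB arr (r :: rest, memo) = (pending.reverse ++ r :: rest, memo) := by
            simp only [stepB, hnone, Option.isSome_none, Bool.false_eq_true, if_false]
            rw [if_neg (by rw [← hpdef]; simpa using hpend)]
          have e3 : stepB arr (r :: rest, m') = (rest, mset m' r (W arr r.toNat)) := by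
            simp only [stepB, hm'r, Option.isSome_none, Bool.false_eq_true, if_false, hpend', if_true, htot']
          rw [show k' + 2 = (k' + 1) + 1 by omega]
          rw [Function.iterate_succ_apply, e1]
          rw [Function.iterate_succ_apply', he', e3]
        · intro q v h
          have h1 := hmono' _ _ h
          rw [mget_mset_ne m' r q _ (fun hq => by rw [hq, hm'r] at h1; exact absurd h1 (by simp))]
          exact h1
        · intro q v h
          by_cases hq : q = r
          · exact Or.inr (le_of_eq hq)
          · rw [mget_mset_ne m' r q _ hq] at h
            rcases hnew' _ _ h with h' | h'
            · exact Or.inl h'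
            · exact Or.inr (by omega)
        · rw [msome_set_fresh m' r _ (by omega) hrsz' hm'r]
          have hLp : pending.reverse.length ≤ arr.length := by
            rw [List.length_reverse, hpdef, List.length_map]
            exact List.length_filter_le _ _
          have hmul : (2 * arr.length + 2) * (msome m' + 1) = (2 * arr.length + 2) * msome m' + (2 * arr.length + 2) := by ring
          omega

theorem B_eq_W (arr : List Int) (hpos : ∀ j ∈ arr, 0 < j) (n amt : Int) (hamt : 0 ≤ amt) :
    coin_perm_alt n arr amt = W arr amt.toNat := by
  unfold coin_perm_alt
  dsimp only
  have hsz0 : (mset (Array.replicate (amt.toNat + 1) none) 0 1).size = amt.toNat + 1 := by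
    rw [size_mset, Array.size_replicate]
  have hrep : ∀ q : Int, mget (Array.replicate (amt.toNat + 1) (none : Option Int)) q = none := by
    intro q
    rw [mget_eq]
    by_cases h : 0 ≤ q
    · rw [if_pos h, List.getD_eq_getElem?_getD, Array.toList_replicate, List.getElem?_replicate]
      split <;> rfl
    · rw [if_neg h]
  have hInv0 : InvM arr (mset (Array.replicate (amt.toNat + 1) none) 0 1) := by
    constructor
    · rw [mget_mset_self _ _ _ le_rfl (by rw [Array.size_replicate]; omega)]
    · intro q v h
      by_cases hq : q = 0
      · subst hq
        rw [mget_mset_self _ _ _ le_rfl (by rw [Array.size_replicate]; omega)] at h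
        exact ⟨le_rfl, by rw [← Option.some_inj.mp h]; simp [W]⟩
      · rw [mget_mset_ne _ 0 q _ hq, hrep q] at h
        exact absurd h (by simp)
  obtain ⟨k, m', he, hI, hszp, hmono, hnew, hgot, hb⟩ :=
    resolve arr hpos (amt.toNat + 1) amt (mset (Array.replicate (amt.toNat + 1) none) 0 1) []
      hamt (by omega) (by omega) hInv0
  have hms0 : msome (mset (Array.replicate (amt.toNat + 1) (none : Option Int)) 0 1) = 1 := by
    rw [msome_set_fresh _ _ _ le_rfl (by rw [Array.size_replicate]; omega) (hrep 0)]
    unfold msome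
    simp
  have hms' : msome m' ≤ amt.toNat + 1 := le_trans (msome_le m') (by omega)
  have hk : k ≤ (amt.toNat + 2) * (2 * arr.length + 4) := by
    rw [hms0] at hb
    have h1 : (2 * arr.length + 2) * msome m' ≤ (2 * arr.length + 2) * (amt.toNat + 1) :=
      Nat.mul_le_mul_left _ hms'
    nlinarith [hb, h1]
  rw [show (amt.toNat + 2) * (2 * arr.length + 4)
      = ((amt.toNat + 2) * (2 * arr.length + 4) - k) + k from (Nat.sub_add_cancel hk).symm]
  rw [Function.iterate_add_apply, he, step_nil]
  rw [hgot]
  rfl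

-- ===== VERDICT (by name: the statement is the Claim_ definition above) =====
theorem coin_perm_spec : Claim_equal_coin_perm := by
  intro n arr amt _ hpre
  unfold Spec_coin_perm
  unfold Pre_coin_perm at hpre
  obtain ⟨hamt, hcase⟩ := hpre
  by_cases hposall : ∀ j ∈ arr, 0 < j
  · rw [A_bridge n arr amt hamt, A_eq_W arr hposall amt hamt, B_eq_W arr hposall n amt hamt]
  · have h0 : amt = 0 := by tauto
    subst h0
    have hA : coin_perm n arr 0 = 1 := by
      rw [A_bridge n arr 0 le_rfl]
      unfold coinA
      dsimp only
      norm_num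
      rfl
    have hB : coin_perm_alt n arr 0 = 1 := by
      unfold coin_perm_alt
      dsimp only
      rw [show ((0 : Int).toNat + 2) * (2 * arr.length + 4) = (4 * arr.length + 7) + 1 by simp; ring]
      rw [Function.iterate_succ_apply]
      have hm : mget (mset (Array.replicate ((0 : Int).toNat + 1) none) 0 1) 0 = some 1 :=
        mget_mset_self _ _ _ le_rfl (by rw [Array.size_replicate]; omega)
      rw [show stepB arr ([(0 : Int)], mset (Array.replicate ((0 : Int).toNat + 1) none) 0 1)
          = ([], mset (Array.replicate ((0 : Int).toNat + 1) none) 0 1) by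
        unfold stepB
        change (if (mget (mset (Array.replicate ((0 : Int).toNat + 1) none) 0 1) 0).isSome = true then _ else _) = _
        rw [hm]
        rfl]
      rw [step_nil, hm]
      rfl
    rw [hA, hB]
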